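-- pv_equiv track=rewrite | github.com/MagnusWagner/WizardNFSP | rlcard/games/wizard_simple/utils.py | getPlayerOrders
-- ===== SOURCE A (Python) =====
-- def getPlayerOrders(num_players):
--     '''
--     returns a list of player orders as a dict().
--     Key is the starting player.
--     Value is order_list of players following the starting player.
--     (More relevant for more than 2 players.)
--     '''
--     player_orders = dict()
--     for starting_player_idx in range(num_players):
--         player_order = []
--         order_player_index=starting_player_idx
--         for i in range(num_players):
--             player_order.append(order_player_index)
--             order_player_index = (order_player_index + 1) % num_players
--         player_orders[starting_player_idx]=player_order
--     return player_orders
-- ===== SOURCE B (Python) =====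
-- def getPlayerOrders(num_players):
--     return {start: list(range(start, num_players)) + list(range(start))
--             for start in range(num_players)}
-- ===== Notes on version B (the rewrite author's own statement) =====
-- stated objective: idiomatic
-- what changed: Replaces the inner per-element modulo loop with a dict comprehension building each rotation as two contiguous ranges concatenated.
import Mathlib
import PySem

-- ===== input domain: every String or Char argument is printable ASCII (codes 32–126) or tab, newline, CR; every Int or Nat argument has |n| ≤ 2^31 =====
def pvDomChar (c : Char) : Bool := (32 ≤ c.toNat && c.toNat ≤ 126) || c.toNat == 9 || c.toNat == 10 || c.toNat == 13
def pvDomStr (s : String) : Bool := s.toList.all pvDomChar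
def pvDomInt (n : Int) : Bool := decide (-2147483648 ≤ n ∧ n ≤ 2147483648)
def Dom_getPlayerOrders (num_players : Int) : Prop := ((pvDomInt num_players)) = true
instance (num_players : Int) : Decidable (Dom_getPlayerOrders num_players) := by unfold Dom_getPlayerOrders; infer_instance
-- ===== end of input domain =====

-- B replaces A's inner append-and-modulo loop by a dict comprehension mapping each
-- starting player to the concatenation of two contiguous ranges (idiomatic, same cost).

-- ===== PORT A =====
-- inner loop body: state is (player_order, order_player_index)
def getPlayerOrders (num_players : Int) : List (Int × List Int) :=
  ((PySem.List.pyRange 0 num_players 1).foldl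
    (fun (player_orders : PySem.Dict Int (List Int)) starting_player_idx =>
      let st := (PySem.List.pyRange 0 num_players 1).foldl
        (fun (st : List Int × Int) _ =>
          (st.1 ++ [st.2], PySem.Int.mod (st.2 + 1) num_players))
        ([], starting_player_idx)
      player_orders.insert starting_player_idx st.1)
    PySem.Dict.empty).items

-- ===== PORT B =====
def getPlayerOrders_alt (num_players : Int) : List (Int × List Int) :=
  (PySem.List.pyRange 0 num_players 1).map
    (fun start => (start, PySem.List.pyRange start num_players 1 ++ PySem.List.pyRange 0 start 1))

-- ===== PRECONDITION & SPEC =====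
def Spec_getPlayerOrders (num_players : Int) (out : List (Int × List Int)) : Prop := out = getPlayerOrders_alt num_players
instance (num_players : Int) (out : List (Int × List Int)) : Decidable (Spec_getPlayerOrders num_players out) := by unfold Spec_getPlayerOrders; infer_instance

-- ===== CLAIM (what is proved, stated in full; the proofs are below) =====
def Claim_equal_getPlayerOrders : Prop := ∀ (num_players : Int), Dom_getPlayerOrders num_players → Spec_getPlayerOrders num_players (getPlayerOrders num_players)

-- ===== LEMMAS AND PROOFS =====

-- abstract run of A's inner loop: list produced and final index after m iterations
def pvRot (n idx : Int) : Nat → List Int × Int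
  | 0 => ([], idx)
  | m + 1 =>
    let r := pvRot n (PySem.Int.mod (idx + 1) n) m
    (idx :: r.1, r.2)

theorem pvFoldl_eq_rot (n : Int) (l : List Int) :
    ∀ (acc : List Int) (idx : Int),
      l.foldl (fun (st : List Int × Int) _ => (st.1 ++ [st.2], PySem.Int.mod (st.2 + 1) n)) (acc, idx)
      = (acc ++ (pvRot n idx l.length).1, (pvRot n idx l.length).2) := by
  induction l with
  | nil => intro acc idx; simp [pvRot]
  | cons x xs ih =>
    intro acc idx
    simp only [List.foldl_cons, List.length_cons, pvRot]
    rw [ih]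
    simp

theorem pvRot_add (n idx : Int) (a b : Nat) :
    pvRot n idx (a + b)
      = ((pvRot n idx a).1 ++ (pvRot n (pvRot n idx a).2 b).1,
         (pvRot n (pvRot n idx a).2 b).2) := by
  induction a generalizing idx with
  | zero => simp [pvRot]
  | succ a ih =>
    have h : a + 1 + b = (a + b) + 1 := by omega
    rw [h]
    simp only [pvRot]
    rw [ih]
    simp

theorem pvRot_straight (n : Int) (m : Nat) :
    ∀ (idx : Int), 0 ≤ idx → idx < n → idx + (m : Int) ≤ n →
      pvRot n idx m
        = (PySem.List.pyRange idx (idx + m) 1,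
           if idx + (m : Int) = n then 0 else idx + m) := by
  induction m with
  | zero =>
    intro idx h0 hlt _
    simp [pvRot, PySem.List.pyRange_one_eq_nil (le_refl idx)]
    omega
  | succ m ih =>
    intro idx h0 hlt hm
    push_cast at hm ⊢
    simp only [pvRot]
    by_cases hcase : idx + 1 < n
    · have hmod : PySem.Int.mod (idx + 1) n = idx + 1 := by
        rw [PySem.Int.mod_eq_emod_of_pos (by omega)]
        exact Int.emod_eq_of_lt (by omega) hcase
      rw [hmod, ih (idx + 1) (by omega) hcase (by omega)]
      rw [Prod.mk.injEq]
      constructor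
      · rw [PySem.List.pyRange_one_cons (by omega : idx < idx + (m + 1))]
        push_cast
        congr 2
        omega
      · split_ifs with h1 h2 h2 <;> omega
    · -- idx + 1 = n, hence m = 0
      have hn : idx + 1 = n := by omega
      have hm0 : m = 0 := by omega
      subst hm0
      have hmod : PySem.Int.mod (idx + 1) n = 0 := by
        rw [hn, PySem.Int.mod_eq_emod_of_pos (by omega)]
        simp
      rw [hmod]
      simp only [pvRot, Prod.mk.injEq]
      constructor
      · have h : idx + ((0 : Nat) + 1 : Int) = idx + 1 := by push_cast; ring
        rw [h, PySem.List.pyRange_one_singleton]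
      · rw [if_pos (by push_cast; omega)]

theorem pvRot_full (n s : Int) (h0 : 0 ≤ s) (hs : s < n) :
    (pvRot n s n.toNat).1
      = PySem.List.pyRange s n 1 ++ PySem.List.pyRange 0 s 1 := by
  have hn : 0 < n := by omega
  have hsplit : n.toNat = (n - s).toNat + s.toNat := by omega
  rw [hsplit, pvRot_add]
  have h1 := pvRot_straight n (n - s).toNat s h0 hs (by omega)
  have hcast1 : s + ((n - s).toNat : Int) = n := by omega
  rw [hcast1, if_pos rfl] at h1
  have h2 := pvRot_straight n s.toNat 0 (le_refl 0) hn (by omega)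
  have hcast2 : (0 : Int) + (s.toNat : Int) = s := by omega
  rw [hcast2, if_neg (by omega : ¬ s = n)] at h2
  rw [h1]
  simp only []
  rw [h2]

theorem getPlayerOrders_eq (n : Int) : getPlayerOrders n = getPlayerOrders_alt n := by
  unfold getPlayerOrders getPlayerOrders_alt
  rw [PySem.Dict.items_foldl_insert_fresh
      (k := fun s => s)
      (v := fun s =>
        ((PySem.List.pyRange 0 n 1).foldl
          (fun (st : List Int × Int) _ => (st.1 ++ [st.2], PySem.Int.mod (st.2 + 1) n)) ([], s)).1)
      (d := PySem.Dict.empty)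
      (l := PySem.List.pyRange 0 n 1)
      (by intro a _; simp [PySem.Dict.contains_empty])
      (by simpa using PySem.List.nodup_pyRange_one 0 n)]
  simp only [PySem.Dict.empty, List.nil_append]
  apply List.map_congr_left
  intro s hs
  have hmem := (PySem.List.mem_pyRange_one).1 hs
  rw [pvFoldl_eq_rot]
  simp only [List.nil_append]
  congr 1
  rw [PySem.List.length_pyRange_one]
  have : (n - 0).toNat = n.toNat := by omega
  rw [this]
  exact pvRot_full n s hmem.1 hmem.2

-- ===== VERDICT (by name: the statement is the Claim_ definition above) =====
theorem getPlayerOrders_spec : Claim_equal_getPlayerOrders := by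
  intro n _
  unfold Spec_getPlayerOrders
  exact getPlayerOrders_eq n
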